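-- pv_equiv track=rewrite | github.com/apromessi/interviewprep | ariana_prep/oct_practice/particle_positions.py | solution
-- ===== SOURCE A (Python) =====
-- MAX_TALLY = 1000000000
--
-- def calculate(n):
--     """
--     Get the number of sub-periods for a given length of time (n). Happens to be equal
--     to the nth number in a list where each item is equal to the previous item
--     plus the current index.
--     """
--     if n == 0:
--         return 0
--     else:
--         return calculate(n-1) + n
--
-- def count_sub_periods(start_index, end_index):
--     """
--     Get the number of sub-periods inside of a given start and end index, excluding
--     sub-periods that are only three items long or less. The former have already
--     been added to the tally, while the latter are invalid.
--     """
--     sub_periods = calculate(end_index - start_index - 3)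
--     return sub_periods
--
-- def solution(A):
--     """
--     Given a list of particle positions (A), calculate the number of time periods
--     longer than three where the particle's velocity was stable. Track a running
--     queue of three positions and compare the differences between the two pairs
--     of consecutive positions. If they are equal, increment the tally that tracks
--     periods of stability. Every time we find a period of stability, set the
--     period_start_index, so that when the period ends, we can figure out how many
--     internal periods of stability longer than three moments exist inside of the
--     containing period and increment the tally accordingly.
--     """
--     max_index = len(A) - 1
--     tally = 0
--
--     if max_index < 2:
--         return tally
--
--     subsection = [A[0], A[1], A[2]]
--     differences = [A[0] - A[1], A[1] - A[2]]
--
--     # track the start index of a period of stability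
--     period_start_index = None
--
--     i = 2
--
--     while len(subsection) > 2:
--         if differences[0] == differences[1]:
--             tally += 1
--             if period_start_index is None:
--                 period_start_index = i-2
--         else:
--             # accounting for enclosing time periods of stability when entering a period
--             # of instability - increment tally for enclosing period and reset start index
--             if period_start_index is not None:
--                 tally += count_sub_periods(period_start_index, i)
--             period_start_index = None
--
--         subsection.pop(0)
--         differences.pop(0)
--
--         if i + 1 <= max_index:
--             i += 1
--             new_num = A[i]
--             subsection.append(new_num)
--             differences.append(subsection[1] - new_num)
--
--         if tally > MAX_TALLY:
--             return -1
--
--     if period_start_index is not None: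
--         tally += count_sub_periods(period_start_index, i+1)
--
--     return tally
-- ===== SOURCE B (Python) =====
-- MAX_TALLY = 1000000000
--
-- def calculate(n):
--     if n == 0:
--         return 0
--     return calculate(n - 1) + n
--
-- def solution(A):
--     """Count stability periods longer than three: scan the list of consecutive
--     differences once with a run-length counter, counting each equal adjacent
--     pair of differences as it is seen and closing each maximal run with its
--     enclosed sub-periods; bail out with -1 as soon as the count exceeds
--     MAX_TALLY during the scan."""
--     if len(A) < 3:
--         return 0
--     d = [x - y for x, y in zip(A, A[1:])]
--     total = 0
--     run = 1  # length of the current run of equal consecutive differences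
--     for prev, cur in zip(d, d[1:]):
--         if cur == prev:
--             run += 1
--             total += 1
--         else:
--             if run >= 2:
--                 total += calculate(run - 2)
--             run = 1
--         if total > MAX_TALLY:
--             return -1
--     if run >= 2:
--         total += calculate(run - 2)
--     return total
-- ===== Notes on version B (the rewrite author's own statement) =====
-- stated objective: simpler
-- what changed: B replaces A's mutated three-element sliding-window lists, pop/append bookkeeping and period_start_index Option state by a single run-length scan over the precomputed difference list, counting each equal adjacent pair as it is seen and closing each maximal run with the same recursive triangular helper.
import Mathlib
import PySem

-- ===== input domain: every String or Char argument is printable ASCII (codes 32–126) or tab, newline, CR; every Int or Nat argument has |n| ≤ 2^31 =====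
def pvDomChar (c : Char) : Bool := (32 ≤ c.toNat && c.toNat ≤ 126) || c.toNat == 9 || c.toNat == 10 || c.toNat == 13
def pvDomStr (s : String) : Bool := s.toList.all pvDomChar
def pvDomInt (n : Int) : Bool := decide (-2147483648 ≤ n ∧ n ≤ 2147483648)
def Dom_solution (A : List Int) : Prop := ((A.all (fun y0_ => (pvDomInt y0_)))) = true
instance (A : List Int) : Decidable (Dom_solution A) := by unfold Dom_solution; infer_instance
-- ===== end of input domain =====

-- B replaces A's sliding-window queues and period-start bookkeeping by one run-length scan
-- over the precomputed difference list (objective: simpler); return value only.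
-- ===== PORT A =====
-- calculate(n): Python diverges (RecursionError) for n < 0; A only ever calls it with n >= 0, where this is exact.
def calculate (n : Int) : Int :=
  if n ≤ 0 then 0 else calculate (n - 1) + n
termination_by n.toNat
decreasing_by omega

def count_sub_periods (start_index end_index : Int) : Int :=
  calculate (end_index - start_index - 3)

-- A's while loop: state = (subsection, differences, period_start_index, i, tally); 'rest' is the
-- unread suffix A[i+1:], so 'i + 1 <= max_index' is 'rest ≠ []' (same test, termination-friendly view).
def loopA : List Int → List Int → Option Int → Int → Int → List Int → Int
  | _s0 :: s1 :: s2 :: srest, d0 :: d1 :: drest, psi, i, tally, rest =>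
      let tally' := if d0 = d1 then tally + 1
                    else match psi with
                         | some p => tally + count_sub_periods p i
                         | none => tally
      let psi' : Option Int := if d0 = d1 then (match psi with | some p => some p | none => some (i - 2))
                               else none
      match rest with
      | [] =>
          if tally' > 1000000000 then -1
          else loopA (s1 :: s2 :: srest) (d1 :: drest) psi' i tally' []
      | r0 :: rrest =>
          if tally' > 1000000000 then -1
          else loopA (s1 :: s2 :: srest ++ [r0]) (d1 :: drest ++ [s2 - r0]) psi' (i + 1) tally' rrest
  | _, _, psi, i, tally, _ =>
      match psi with
      | some p => tally + count_sub_periods p (i + 1)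
      | none => tally
termination_by sub _ _ _ _ rest => sub.length + rest.length
decreasing_by all_goals simp

def solution (A : List Int) : Int :=
  if (A.length : Int) - 1 < 2 then 0
  else match A with
       | a0 :: a1 :: a2 :: rest =>
           loopA [a0, a1, a2] [a0 - a1, a1 - a2] none 2 0 rest
       | _ => 0

-- ===== PORT B =====
-- Source B's for loop over zip(d, d[1:]) with its early 'return -1', plus the epilogue after the loop
def loopB : List (Int × Int) → Int → Int → Int
  | [], total, run => if 2 ≤ run then total + calculate (run - 2) else total
  | (prev, cur) :: rest, total, run =>
      let tr := if cur = prev then (total + 1, run + 1)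
                else (if 2 ≤ run then total + calculate (run - 2) else total, 1)
      if tr.1 > 1000000000 then -1 else loopB rest tr.1 tr.2

def solution_alt (A : List Int) : Int :=
  if A.length < 3 then 0
  else
    let d := List.zipWith (fun x y => x - y) A A.tail
    loopB (List.zipWith Prod.mk d d.tail) 0 1

-- ===== PRECONDITION & SPEC =====
def Spec_solution (A : List Int) (out : Int) : Prop := out = solution_alt A
instance (A : List Int) (out : Int) : Decidable (Spec_solution A out) := by unfold Spec_solution; infer_instance

-- ===== CLAIM (what is proved, stated in full; the proofs are below) =====
def Claim_equal_solution : Prop := ∀ (A : List Int), Dom_solution A → Spec_solution A (solution A)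

-- ===== LEMMAS AND PROOFS =====

-- future second components of the difference pairs the loop has yet to compare
def futureD (d1 s2 : Int) (r : List Int) : List Int :=
  d1 :: List.zipWith (fun x y => x - y) (s2 :: r) r

theorem loopA_none (s1 s2 d0 i tally : Int) :
    loopA [s1, s2] [d0] none i tally [] = tally := by
  rw [loopA]
  intros; simp_all

theorem loopA_some (s1 s2 d0 i tally p : Int) :
    loopA [s1, s2] [d0] (some p) i tally [] = tally + count_sub_periods p (i + 1) := by
  rw [loopA]
  intros; simp_all

theorem loopA_eq (r : List Int) : ∀ (s0 s1 s2 d0 d1 i tally run : Int) (psi : Option Int),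
    (psi = none → run = 1) →
    (∀ p, psi = some p → run = i - 1 - p ∧ 2 ≤ run) →
    loopA [s0, s1, s2] [d0, d1] psi i tally r =
      loopB (List.zipWith Prod.mk (d0 :: futureD d1 s2 r) (futureD d1 s2 r)) tally run := by
  induction r with
  | nil =>
      intro s0 s1 s2 d0 d1 i tally run psi hnone hsome
      simp only [futureD, List.zipWith, loopB]
      cases psi with
      | none =>
          have hr := hnone rfl
          subst hr
          simp only [loopA]
          split_ifs <;>
            simp_all [loopA_none, loopA_some, count_sub_periods]
      | some p =>
          obtain ⟨hr, h2⟩ := hsome p rfl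
          subst hr
          have e1 : calculate (i + 1 - p - 3) = calculate (i - 1 - p + 1 - 2) := by congr 1; omega
          have e2 : calculate (i - p - 3) = calculate (i - 1 - p - 2) := by congr 1; omega
          simp only [loopA]
          split_ifs <;>
            simp_all [loopA_none, loopA_some, count_sub_periods, e1, e2] <;> omega
  | cons r0 rrest ih =>
      intro s0 s1 s2 d0 d1 i tally run psi hnone hsome
      have hD : futureD d1 s2 (r0 :: rrest) = d1 :: futureD (s2 - r0) r0 rrest := by
        simp [futureD]
      rw [hD]
      simp only [List.zipWith, loopB]
      cases psi with
      | none =>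
          have hr := hnone rfl
          subst hr
          by_cases hd : d0 = d1
          · have hcur : d1 = d0 := hd.symm
            simp only [loopA, if_pos hd, if_pos hcur]
            split_ifs with hbig
            · rfl
            · exact ih s1 s2 r0 d1 (s2 - r0) (i + 1) (tally + 1) 2 (some (i - 2))
                (by intro h; cases h) (by intro p hp; injection hp with hp; omega)
          · have hcur : ¬ d1 = d0 := fun h => hd h.symm
            simp only [loopA, if_neg hd, if_neg hcur, if_neg (by omega : ¬ (2:Int) ≤ 1)]
            split_ifs with hbig
            · rfl
            · exact ih s1 s2 r0 d1 (s2 - r0) (i + 1) tally 1 none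
                (fun _ => rfl) (by intro p hp; cases hp)
      | some p =>
          obtain ⟨hr, h2⟩ := hsome p rfl
          subst hr
          by_cases hd : d0 = d1
          · have hcur : d1 = d0 := hd.symm
            simp only [loopA, if_pos hd, if_pos hcur]
            split_ifs with hbig
            · rfl
            · exact ih s1 s2 r0 d1 (s2 - r0) (i + 1) (tally + 1) (i - 1 - p + 1) (some p)
                (by intro h; cases h) (by intro q hq; injection hq with hq; subst hq; omega)
          · have hcur : ¬ d1 = d0 := fun h => hd h.symm
            have harg : count_sub_periods p i = calculate (i - 1 - p - 2) := by
              unfold count_sub_periods; ring_nf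
            simp only [loopA, if_neg hd, if_neg hcur, if_pos h2, harg]
            split_ifs with hbig
            · rfl
            · exact ih s1 s2 r0 d1 (s2 - r0) (i + 1) (tally + calculate (i - 1 - p - 2)) 1 none
                (fun _ => rfl) (by intro q hq; cases hq)

-- ===== VERDICT (by name: the statement is the Claim_ definition above) =====
theorem solution_spec : Claim_equal_solution := by
  intro A _
  unfold Spec_solution
  match A with
  | [] => rfl
  | [a0] => rfl
  | [a0, a1] => rfl
  | a0 :: a1 :: a2 :: rest =>
      have h := loopA_eq rest a0 a1 a2 (a0 - a1) (a1 - a2) 2 0 1 none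
        (fun _ => rfl) (fun p hp => by cases hp)
      rw [solution, solution_alt]
      rw [if_neg (by simp only [List.length_cons]; push_cast; omega), if_neg (by simp)]
      rw [h]
      simp only [futureD, List.zipWith, List.tail_cons]
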